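-- pv_equiv track=rewrite | github.com/qnlewis/py-learning-exercises | fun-002-patterns-c-main/fun-002-patterns-c-main/patterns.py | draw_triangle
-- ===== SOURCE A (Python) =====
-- def draw_triangle(height: int) -> str:
--     if height <= 0:
--         return ""
--     result = []
--     for i in range(1, height + 1):
--         row = "".join(str(num) for num in range(1, i + 1))
--         result.append(row)
--     return "\n".join(result)
-- ===== SOURCE B (Python) =====
-- def draw_triangle(height: int) -> str:
--     rows = []
--     cur = ""
--     for i in range(1, height + 1):
--         cur = cur + str(i)
--         rows.append(cur)
--     return "\n".join(rows)
-- ===== Notes on version B (the rewrite author's own statement) =====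
-- stated objective: faster
-- what changed: Each row is built incrementally by extending a carried string accumulator with str(i), replacing A's per-row inner join over range(1,i+1); the explicit non-positive-height guard disappears because the empty loop yields an empty join.
import Mathlib
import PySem

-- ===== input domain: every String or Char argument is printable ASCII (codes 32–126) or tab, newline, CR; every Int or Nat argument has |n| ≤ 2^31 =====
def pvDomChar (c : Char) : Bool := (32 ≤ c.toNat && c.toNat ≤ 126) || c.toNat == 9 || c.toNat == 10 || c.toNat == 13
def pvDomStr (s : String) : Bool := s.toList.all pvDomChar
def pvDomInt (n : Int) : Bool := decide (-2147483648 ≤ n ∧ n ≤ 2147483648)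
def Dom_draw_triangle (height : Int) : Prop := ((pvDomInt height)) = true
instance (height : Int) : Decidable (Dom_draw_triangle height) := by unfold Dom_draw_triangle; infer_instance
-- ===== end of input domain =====

-- B builds each row incrementally from the previous one via a carried string accumulator
-- (no inner per-row join, no height<=0 guard); alternative decomposition, same result.

-- ===== PORT A =====
def draw_triangle (height : Int) : String :=
  if height ≤ 0 then ""
  else
    let result := (PySem.List.pyRange 1 (height + 1) 1).foldl
      (fun (result : List String) i =>
        let row := PySem.Str.join "" ((PySem.List.pyRange 1 (i + 1) 1).map PySem.Int.toStr)
        result ++ [row]) []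
    PySem.Str.join "\n" result

-- ===== PORT B =====
def draw_triangle_alt (height : Int) : String :=
  let st := (PySem.List.pyRange 1 (height + 1) 1).foldl
    (fun (st : List String × String) i =>
      let cur := st.2 ++ PySem.Int.toStr i
      (st.1 ++ [cur], cur)) ([], "")
  PySem.Str.join "\n" st.1

-- ===== PRECONDITION & SPEC =====
def Spec_draw_triangle (height : Int) (out : String) : Prop := out = draw_triangle_alt height
instance (height : Int) (out : String) : Decidable (Spec_draw_triangle height out) := by unfold Spec_draw_triangle; infer_instance

-- ===== CLAIM (what is proved, stated in full; the proofs are below) =====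
def Claim_equal_draw_triangle : Prop := ∀ (height : Int), Dom_draw_triangle height → Spec_draw_triangle height (draw_triangle height)

-- ===== LEMMAS AND PROOFS =====

theorem chars_join_empty_append (xs : List (List Char)) (y : List Char) :
    PySem.Chars.join [] (xs ++ [y]) = PySem.Chars.join [] xs ++ y := by
  induction xs with
  | nil => simp [PySem.Chars.join_nil, PySem.Chars.join_singleton]
  | cons a rest ih =>
    cases rest with
    | nil => simp [PySem.Chars.join_singleton, PySem.Chars.join_cons_cons]
    | cons b rest' =>
      have h1 : a :: b :: rest' ++ [y] = a :: (b :: (rest' ++ [y])) := by simp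
      have h2 : b :: rest' ++ [y] = b :: (rest' ++ [y]) := by simp
      rw [h1, PySem.Chars.join_cons_cons, PySem.Chars.join_cons_cons, ← h2, ih]
      simp

theorem join_empty_append (xs : List String) (y : String) :
    PySem.Str.join "" (xs ++ [y]) = PySem.Str.join "" xs ++ y := by
  apply String.toList_inj.mp
  simp only [String.toList_append, PySem.Str.toList_join, List.map_append, List.map_cons,
    List.map_nil]
  have : ("" : String).toList = [] := rfl
  rw [this, chars_join_empty_append]

theorem invariant (n : Nat) :
    ((PySem.List.pyRange 1 ((n : Int) + 1) 1).foldl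
      (fun (st : List String × String) i =>
        let cur := st.2 ++ PySem.Int.toStr i
        (st.1 ++ [cur], cur)) ([], ""))
    = ((PySem.List.pyRange 1 ((n : Int) + 1) 1).foldl
        (fun (result : List String) i =>
          let row := PySem.Str.join "" ((PySem.List.pyRange 1 (i + 1) 1).map PySem.Int.toStr)
          result ++ [row]) [],
       PySem.Str.join "" ((PySem.List.pyRange 1 ((n : Int) + 1) 1).map PySem.Int.toStr)) := by
  induction n with
  | zero => rfl
  | succ m ih =>
    push_cast
    have hsplit : PySem.List.pyRange 1 ((m : Int) + 1 + 1) 1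
        = PySem.List.pyRange 1 ((m : Int) + 1) 1 ++ [(m : Int) + 1] :=
      PySem.List.pyRange_one_succ_right (by omega)
    rw [hsplit, List.foldl_append, List.foldl_append, ih]
    simp only [List.foldl_cons, List.foldl_nil, List.map_append, List.map_cons, List.map_nil]
    rw [hsplit]
    simp only [List.map_append, List.map_cons, List.map_nil]
    rw [join_empty_append]

-- ===== VERDICT (by name: the statement is the Claim_ definition above) =====
theorem draw_triangle_spec : Claim_equal_draw_triangle := by
  intro height _
  unfold Spec_draw_triangle draw_triangle draw_triangle_alt
  by_cases h : height ≤ 0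
  · simp only [h, if_pos]
    rw [PySem.List.pyRange_one_eq_nil (by omega)]
    simp [PySem.Str.join]
  · simp only [h, if_neg, not_false_iff]
    obtain ⟨n, hn⟩ : ∃ n : Nat, (n : Int) = height := ⟨height.toNat, by omega⟩
    rw [← hn, invariant n]
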